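-- pv_equiv track=rewrite | github.com/BrianMills2718/kgas | experiments/mcp_routing/CORRECTED_DAG_VALIDATION_SYSTEM.py | _tools_functionally_similar
-- ===== SOURCE A (Python) =====
-- def _tools_functionally_similar(tool1: str, tool2: str) -> bool:
--     """Check if two tools are functionally similar"""
--     similar_groups = [
--         ["extract_entities_basic", "extract_entities_llm_gpt4", "extract_entities_spacy"],
--         ["summarize_extractive", "summarize_abstractive"],
--         ["chunk_text_semantic", "chunk_text_fixed"],
--         ["clean_text_basic", "clean_text_business"]
--     ]
--
--     for group in similar_groups:
--         if tool1 in group and tool2 in group: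
--             return True
--     return False
-- ===== SOURCE B (Python) =====
-- _SIMILAR_GROUPS = [
--     ["extract_entities_basic", "extract_entities_llm_gpt4", "extract_entities_spacy"],
--     ["summarize_extractive", "summarize_abstractive"],
--     ["chunk_text_semantic", "chunk_text_fixed"],
--     ["clean_text_basic", "clean_text_business"],
-- ]
--
-- _GROUP_OF = {name: i for i, group in enumerate(_SIMILAR_GROUPS) for name in group}
--
--
-- def _tools_functionally_similar(tool1: str, tool2: str) -> bool:
--     """Check if two tools are functionally similar"""
--     g1 = _GROUP_OF.get(tool1)
--     return g1 is not None and g1 == _GROUP_OF.get(tool2)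
-- ===== Notes on version B (the rewrite author's own statement) =====
-- stated objective: idiomatic
-- what changed: Replaces the per-call scan over groups with per-group membership tests by a precomputed name-to-group-index dict built once at module load; the call is two O(1) lookups and an equality check (guarded so unknown tools never match).
import Mathlib
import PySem

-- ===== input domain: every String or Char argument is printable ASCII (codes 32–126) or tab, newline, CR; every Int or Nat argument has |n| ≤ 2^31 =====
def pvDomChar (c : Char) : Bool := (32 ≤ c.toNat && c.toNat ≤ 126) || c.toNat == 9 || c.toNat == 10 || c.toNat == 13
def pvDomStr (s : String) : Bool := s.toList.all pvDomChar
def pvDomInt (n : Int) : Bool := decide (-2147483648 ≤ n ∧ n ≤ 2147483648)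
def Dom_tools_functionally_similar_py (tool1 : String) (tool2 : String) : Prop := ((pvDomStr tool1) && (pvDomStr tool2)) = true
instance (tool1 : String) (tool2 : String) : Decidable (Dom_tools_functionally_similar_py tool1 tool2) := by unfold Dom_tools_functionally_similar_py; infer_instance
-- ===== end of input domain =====

-- B replaces A's per-call scan over similarity groups by a precomputed name→group-index
-- dict, so the check is two lookups and a guarded equality (idiomatic; same behaviour).


-- ===== PORT A =====
def aSimilarGroups : List (List String) :=
  [["extract_entities_basic", "extract_entities_llm_gpt4", "extract_entities_spacy"],
   ["summarize_extractive", "summarize_abstractive"],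
   ["chunk_text_semantic", "chunk_text_fixed"],
   ["clean_text_basic", "clean_text_business"]]

-- the 'for group in similar_groups: if … return True' loop
def aScan (tool1 : String) (tool2 : String) : List (List String) → Bool
  | [] => false
  | g :: rest => if g.contains tool1 && g.contains tool2 then true else aScan tool1 tool2 rest

def tools_functionally_similar_py (tool1 : String) (tool2 : String) : Bool :=
  aScan tool1 tool2 aSimilarGroups

-- ===== PORT B =====
def bSimilarGroups : List (List String) :=
  [["extract_entities_basic", "extract_entities_llm_gpt4", "extract_entities_spacy"],
   ["summarize_extractive", "summarize_abstractive"],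
   ["chunk_text_semantic", "chunk_text_fixed"],
   ["clean_text_basic", "clean_text_business"]]

-- the dict comprehension {name: i for i, group in enumerate(groups) for name in group}
def bGroupOf : PySem.Dict String Int :=
  (PySem.List.enumerate bSimilarGroups).foldl
    (fun d ig => ig.2.foldl (fun d name => d.insert name ig.1) d) PySem.Dict.empty

def tools_functionally_similar_py_alt (tool1 : String) (tool2 : String) : Bool :=
  match bGroupOf.get? tool1 with
  | none => false
  | some g1 => bGroupOf.get? tool2 == some g1

-- ===== PRECONDITION & SPEC =====
def Spec_tools_functionally_similar_py (tool1 : String) (tool2 : String) (out : Bool) : Prop := out = tools_functionally_similar_py_alt tool1 tool2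
instance (tool1 : String) (tool2 : String) (out : Bool) : Decidable (Spec_tools_functionally_similar_py tool1 tool2 out) := by unfold Spec_tools_functionally_similar_py; infer_instance

-- ===== CLAIM (what is proved, stated in full; the proofs are below) =====
def Claim_equal_tools_functionally_similar_py : Prop := ∀ (tool1 : String) (tool2 : String), Dom_tools_functionally_similar_py tool1 tool2 → Spec_tools_functionally_similar_py tool1 tool2 (tools_functionally_similar_py tool1 tool2)

-- ===== LEMMAS AND PROOFS =====

-- every string is one of the nine known tool names, or none of them
theorem pv_cases10 (t : String) :
    t = "extract_entities_basic" ∨ t = "extract_entities_llm_gpt4" ∨ t = "extract_entities_spacy" ∨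
    t = "summarize_extractive" ∨ t = "summarize_abstractive" ∨
    t = "chunk_text_semantic" ∨ t = "chunk_text_fixed" ∨
    t = "clean_text_basic" ∨ t = "clean_text_business" ∨
    (t ≠ "extract_entities_basic" ∧ t ≠ "extract_entities_llm_gpt4" ∧ t ≠ "extract_entities_spacy" ∧
     t ≠ "summarize_extractive" ∧ t ≠ "summarize_abstractive" ∧
     t ≠ "chunk_text_semantic" ∧ t ≠ "chunk_text_fixed" ∧
     t ≠ "clean_text_basic" ∧ t ≠ "clean_text_business" ∧
     "extract_entities_basic" ≠ t ∧ "extract_entities_llm_gpt4" ≠ t ∧ "extract_entities_spacy" ≠ t ∧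
     "summarize_extractive" ≠ t ∧ "summarize_abstractive" ≠ t ∧
     "chunk_text_semantic" ≠ t ∧ "chunk_text_fixed" ≠ t ∧
     "clean_text_basic" ≠ t ∧ "clean_text_business" ≠ t) := by
  by_cases h : t ∈ (["extract_entities_basic", "extract_entities_llm_gpt4", "extract_entities_spacy",
      "summarize_extractive", "summarize_abstractive", "chunk_text_semantic", "chunk_text_fixed",
      "clean_text_basic", "clean_text_business"] : List String)
  · simp at h; tauto
  · simp at h
    exact Or.inr (Or.inr (Or.inr (Or.inr (Or.inr (Or.inr (Or.inr (Or.inr (Or.inr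
      ⟨h.1, h.2.1, h.2.2.1, h.2.2.2.1, h.2.2.2.2.1, h.2.2.2.2.2.1, h.2.2.2.2.2.2.1,
       h.2.2.2.2.2.2.2.1, h.2.2.2.2.2.2.2.2,
       fun e => h.1 e.symm, fun e => h.2.1 e.symm, fun e => h.2.2.1 e.symm,
       fun e => h.2.2.2.1 e.symm, fun e => h.2.2.2.2.1 e.symm, fun e => h.2.2.2.2.2.1 e.symm,
       fun e => h.2.2.2.2.2.2.1 e.symm, fun e => h.2.2.2.2.2.2.2.1 e.symm,
       fun e => h.2.2.2.2.2.2.2.2 e.symm⟩))))))))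

-- the dict comprehension evaluated once (as Python does at module load)
theorem bGroupOf_eq : bGroupOf = PySem.Dict.mk
    [("extract_entities_basic", 0), ("extract_entities_llm_gpt4", 0), ("extract_entities_spacy", 0),
     ("summarize_extractive", 1), ("summarize_abstractive", 1),
     ("chunk_text_semantic", 2), ("chunk_text_fixed", 2),
     ("clean_text_basic", 3), ("clean_text_business", 3)] := by rfl

-- ===== VERDICT (by name: the statement is the Claim_ definition above) =====
set_option maxHeartbeats 1600000 in
theorem tools_functionally_similar_py_spec : Claim_equal_tools_functionally_similar_py := by
  intro t1 t2 _
  show tools_functionally_similar_py t1 t2 = tools_functionally_similar_py_alt t1 t2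
  rcases pv_cases10 t1 with h1|h1|h1|h1|h1|h1|h1|h1|h1|h1 <;>
    rcases pv_cases10 t2 with h2|h2|h2|h2|h2|h2|h2|h2|h2|h2 <;>
    simp_all [tools_functionally_similar_py, tools_functionally_similar_py_alt,
      aScan, aSimilarGroups, bGroupOf_eq, PySem.Dict.get?]
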